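-- pv_equiv track=rewrite | github.com/iTsluku/segementation_text_to_json | special_court_munich/process_document.py | remove_linebreak_hyphen
-- ===== SOURCE A (Python) =====
-- def remove_linebreak_hyphen(line: str) -> str:
--     """Remove hyphen if it is followed by a line break, when line processing a document.
--
--     Parameters:
--         line (str): Line of a document.
--
--     Returns:
--         str: Revised version of the text segment.
--     """
--     o = ""
--     prev = ""
--
--     for c in line:
--         if c == "\n" and prev == "-":
--             prev = ""
--         elif c == "\n":
--             o += prev
--             prev = ""
--         else:
--             o += prev
--             prev = c
--     o += prev
--     return o
-- ===== SOURCE B (Python) =====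
-- def remove_linebreak_hyphen(line: str) -> str:
--     """Remove hyphen if it is followed by a line break, when line processing a document.
--
--     Split on newlines, strip one trailing hyphen from every segment except the
--     last, and concatenate (the newlines themselves are dropped).
--     """
--     segments = line.split("\n")
--     return "".join(
--         seg[:-1] if seg.endswith("-") else seg for seg in segments[:-1]
--     ) + segments[-1]
-- ===== Notes on version B (the rewrite author's own statement) =====
-- stated objective: idiomatic
-- what changed: Replaces the char-by-char scan with a one-char pending/lookbehind buffer and repeated string appends by a split-on-newline / strip-one-trailing-hyphen-per-non-final-segment / join pipeline.
import Mathlib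
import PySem

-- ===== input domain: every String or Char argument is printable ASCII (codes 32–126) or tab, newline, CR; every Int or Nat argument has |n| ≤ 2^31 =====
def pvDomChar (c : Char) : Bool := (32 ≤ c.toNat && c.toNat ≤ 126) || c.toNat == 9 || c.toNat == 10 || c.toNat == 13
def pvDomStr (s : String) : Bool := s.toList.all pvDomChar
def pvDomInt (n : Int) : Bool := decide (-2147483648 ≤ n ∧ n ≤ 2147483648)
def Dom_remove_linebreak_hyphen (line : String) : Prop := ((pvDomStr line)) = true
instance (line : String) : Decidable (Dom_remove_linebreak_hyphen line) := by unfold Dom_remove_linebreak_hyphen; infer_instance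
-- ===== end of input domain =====

-- B replaces A's char-by-char scan with a lookbehind buffer by a split('\n')/strip-one-trailing-hyphen/join pipeline (objective: idiomatic).

-- ===== PORT A =====
-- loop body of A: state is (o, prev), both strings of the Python, as char lists
def pvStepA (s : List Char × List Char) (c : Char) : List Char × List Char :=
  if c = '\n' ∧ s.2 = ['-'] then (s.1, [])
  else if c = '\n' then (s.1 ++ s.2, [])
  else (s.1 ++ s.2, [c])

def remove_linebreak_hyphen (line : String) : String :=
  let r := line.toList.foldl pvStepA ([], [])
  String.mk (r.1 ++ r.2)

-- ===== PORT B =====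
-- seg[:-1] if seg.endswith('-') else seg
def pvStrip1 (seg : List Char) : List Char :=
  if PySem.Chars.endswith seg ['-'] then seg.dropLast else seg

-- ''.join(strip1 seg for seg in segments[:-1]) + segments[-1]
def pvJoinB : List (List Char) → List Char
  | [] => []
  | [s] => s
  | s :: rest => pvStrip1 s ++ pvJoinB rest

def remove_linebreak_hyphen_alt (line : String) : String :=
  String.mk (pvJoinB (line.toList.splitOn '\n'))

-- ===== PRECONDITION & SPEC =====
def Spec_remove_linebreak_hyphen (line : String) (out : String) : Prop := out = remove_linebreak_hyphen_alt line
instance (line : String) (out : String) : Decidable (Spec_remove_linebreak_hyphen line out) := by unfold Spec_remove_linebreak_hyphen; infer_instance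

-- ===== CLAIM (what is proved, stated in full; the proofs are below) =====
def Claim_equal_remove_linebreak_hyphen : Prop := ∀ (line : String), Dom_remove_linebreak_hyphen line → Spec_remove_linebreak_hyphen line (remove_linebreak_hyphen line)

-- ===== LEMMAS AND PROOFS =====

-- reference function: drop newlines, and drop one '-' directly before a newline
def pvF : List Char → List Char
  | [] => []
  | [c] => if c = '\n' then [] else [c]
  | c :: d :: cs =>
      if c = '\n' then pvF (d :: cs)
      else if c = '-' ∧ d = '\n' then pvF cs
      else c :: pvF (d :: cs)

theorem pvF_newline (l : List Char) : pvF ('\n' :: l) = pvF l := by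
  cases l <;> simp [pvF]

theorem pvF_hyphen_newline (l : List Char) : pvF ('-' :: '\n' :: l) = pvF l := by
  simp [pvF]

theorem pvF_cons (c : Char) (l : List Char) (hc : c ≠ '\n')
    (h : ¬ (c = '-' ∧ l.head? = some '\n')) : pvF (c :: l) = c :: pvF l := by
  cases l with
  | nil => simp [pvF, hc]
  | cons d cs =>
      simp only [List.head?_cons, Option.some.injEq] at h
      simp [pvF, hc, h]

-- ===== A-side: the fold computes pvF =====
theorem stepA_newline_dash (acc : List Char) : pvStepA (acc, ['-']) '\n' = (acc, []) := by
  simp [pvStepA]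

theorem stepA_newline (acc prev : List Char) (h : prev ≠ ['-']) :
    pvStepA (acc, prev) '\n' = (acc ++ prev, []) := by
  simp [pvStepA, h]

theorem stepA_other (acc prev : List Char) (c : Char) (h : c ≠ '\n') :
    pvStepA (acc, prev) c = (acc ++ prev, [c]) := by
  simp [pvStepA, h]

theorem aInv (l : List Char) : ∀ (acc prev : List Char),
    (prev = [] ∨ ∃ p, p ≠ '\n' ∧ prev = [p]) →
    (l.foldl pvStepA (acc, prev)).1 ++ (l.foldl pvStepA (acc, prev)).2
      = acc ++ pvF (prev ++ l) := by
  induction l with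
  | nil =>
      intro acc prev h
      rcases h with h | ⟨p, hp, h⟩ <;> subst h <;> simp [pvF]
      simp [pvF, hp]
  | cons c cs ih =>
      intro acc prev h
      rcases h with h | ⟨p, hp, h⟩ <;> subst h
      · by_cases hc : c = '\n'
        · subst hc
          rw [List.foldl_cons, stepA_newline acc [] (by simp)]
          simpa [pvF_newline] using ih acc [] (Or.inl rfl)
        · rw [List.foldl_cons, stepA_other acc [] c hc]
          simpa using ih acc [c] (Or.inr ⟨c, hc, rfl⟩)
      · by_cases hc : c = '\n'
        · subst hc
          by_cases hdash : p = '-'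
          · subst hdash
            rw [List.foldl_cons, stepA_newline_dash acc]
            simpa [pvF_hyphen_newline] using ih acc [] (Or.inl rfl)
          · rw [List.foldl_cons, stepA_newline acc [p] (by simp [hdash])]
            rw [ih (acc ++ [p]) [] (Or.inl rfl)]
            simp only [List.cons_append, List.nil_append]
            rw [pvF_cons p ('\n' :: cs) hp (by simp [hdash])]
            simp [pvF_newline]
        · rw [List.foldl_cons, stepA_other acc [p] c hc]
          rw [ih (acc ++ [p]) [c] (Or.inr ⟨c, hc, rfl⟩)]
          simp only [List.cons_append, List.nil_append]
          rw [pvF_cons p (c :: cs) hp (by simp [hc])]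
          simp

-- ===== B-side helper facts =====
theorem strip1_nil : pvStrip1 [] = [] := by decide

theorem strip1_single (c : Char) : pvStrip1 [c] = if c = '-' then [] else [c] := by
  by_cases h : c = '-'
  · subst h; decide
  · have he : PySem.Chars.endswith [c] ['-'] = false := by
      refine Bool.eq_false_iff.mpr (fun hw => ?_)
      rw [PySem.Chars.endswith_iff] at hw
      obtain ⟨t, ht⟩ := hw
      cases t with
      | nil =>
          simp only [List.nil_append] at ht
          injection ht with h1 h2
          exact h h1.symm
      | cons a t' =>
          have := congrArg List.length ht
          simp at this
      
    simp [pvStrip1, he, h]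

theorem endswith_cons (c : Char) (t : List Char) (ht : t ≠ []) :
    PySem.Chars.endswith (c :: t) ['-'] = PySem.Chars.endswith t ['-'] := by
  by_cases h : PySem.Chars.endswith t ['-'] = true
  · rw [h]
    rw [PySem.Chars.endswith_iff] at h ⊢
    exact h.trans (List.suffix_cons c t)
  · rw [Bool.eq_false_iff.mpr h]
    refine Bool.eq_false_iff.mpr (fun hw => h ?_)
    rw [PySem.Chars.endswith_iff] at hw ⊢
    obtain ⟨u, hu⟩ := hw
    cases u with
    | nil =>
        simp only [List.nil_append] at hu
        injection hu with h1 h2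
        exact absurd h2.symm ht
    | cons a u' =>
        simp only [List.cons_append, List.cons.injEq] at hu
        exact ⟨u', hu.2⟩

theorem strip1_cons (c : Char) (t : List Char) (ht : t ≠ []) :
    pvStrip1 (c :: t) = c :: pvStrip1 t := by
  unfold pvStrip1
  rw [endswith_cons c t ht]
  by_cases h : PySem.Chars.endswith t ['-'] = true
  · simp [h, List.dropLast_cons_of_ne_nil ht]
  · simp [Bool.eq_false_iff.2 (by simpa using h)]

-- B-core on a char list
def pvB (l : List Char) : List Char := pvJoinB (l.splitOn '\n')

theorem splitOn_cons (c a : Char) (l : List Char) :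
    (c :: l).splitOn a =
      if c = a then [] :: l.splitOn a else (l.splitOn a).modifyHead (List.cons c) := by
  simp only [List.splitOn, List.splitOnP_cons]
  by_cases h : c = a <;> simp [h]

theorem splitOn_ne_nil (a : Char) (l : List Char) : l.splitOn a ≠ [] := by
  simp only [List.splitOn]
  exact List.splitOnP_ne_nil _ l

theorem pvB_newline (l : List Char) : pvB ('\n' :: l) = pvB l := by
  unfold pvB
  rw [splitOn_cons, if_pos rfl]
  obtain ⟨s, S, hS⟩ : ∃ s S, l.splitOn '\n' = s :: S := by
    cases h : l.splitOn '\n' with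
    | nil => exact absurd h (splitOn_ne_nil _ _)
    | cons s S => exact ⟨s, S, rfl⟩
  rw [hS]
  simp [pvJoinB, strip1_nil]

theorem pvB_hyphen_newline (l : List Char) : pvB ('-' :: '\n' :: l) = pvB l := by
  unfold pvB
  rw [splitOn_cons, if_neg (by decide), splitOn_cons, if_pos rfl]
  obtain ⟨s, S, hS⟩ : ∃ s S, l.splitOn '\n' = s :: S := by
    cases h : l.splitOn '\n' with
    | nil => exact absurd h (splitOn_ne_nil _ _)
    | cons s S => exact ⟨s, S, rfl⟩
  rw [hS]
  have : pvStrip1 ['-'] = [] := by decide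
  simp [pvJoinB, List.modifyHead, this]

theorem pvB_cons (c : Char) (l : List Char) (hc : c ≠ '\n')
    (h : ¬ (c = '-' ∧ l.head? = some '\n')) : pvB (c :: l) = c :: pvB l := by
  unfold pvB
  rw [splitOn_cons, if_neg hc]
  cases l with
  | nil => simp [pvJoinB, List.modifyHead]
  | cons d cs =>
      by_cases hd : d = '\n'
      · subst hd
        have hc' : c ≠ '-' := fun hcc => h ⟨hcc, rfl⟩
        rw [splitOn_cons, if_pos rfl]
        obtain ⟨s, S, hS⟩ : ∃ s S, cs.splitOn '\n' = s :: S := by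
          cases hx : cs.splitOn '\n' with
          | nil => exact absurd hx (splitOn_ne_nil _ _)
          | cons s S => exact ⟨s, S, rfl⟩
        rw [hS]
        simp [pvJoinB, List.modifyHead, strip1_nil, strip1_single, hc']
      · rw [splitOn_cons, if_neg hd]
        obtain ⟨s, S, hS⟩ : ∃ s S, cs.splitOn '\n' = s :: S := by
          cases hx : cs.splitOn '\n' with
          | nil => exact absurd hx (splitOn_ne_nil _ _)
          | cons s S => exact ⟨s, S, rfl⟩
        rw [hS]
        cases S with
        | nil => simp [pvJoinB, List.modifyHead]
        | cons s2 S' =>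
            simp only [List.modifyHead, pvJoinB]
            rw [strip1_cons c (d :: s) (by simp)]
            simp

theorem pvB_eq_pvF (l : List Char) : pvB l = pvF l := by
  induction l using pvF.induct with
  | case1 => simp [pvB, pvF, List.splitOn, pvJoinB]
  | case2 =>
      rw [pvB_newline]
      simp [pvB, pvF, List.splitOn, pvJoinB]
  | case3 c hc =>
      rw [pvB_cons c [] hc (by simp)]
      simp [pvB, pvF, List.splitOn, pvJoinB, hc]
  | case4 d cs ih =>
      rw [pvB_newline, ih, pvF_newline]
  | case5 c d cs h1 h2 ih =>
      obtain ⟨h1', h2'⟩ := h2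
      subst h1' h2'
      rw [pvB_hyphen_newline, ih, pvF_hyphen_newline]
  | case6 c d cs h1 h2 ih =>
      rw [pvB_cons c (d :: cs) h1 (by simpa using h2), ih,
        pvF_cons c (d :: cs) h1 (by simpa using h2)]

-- ===== VERDICT (by name: the statement is the Claim_ definition above) =====
theorem remove_linebreak_hyphen_spec : Claim_equal_remove_linebreak_hyphen := by
  intro line _
  unfold Spec_remove_linebreak_hyphen remove_linebreak_hyphen remove_linebreak_hyphen_alt
  show String.mk ((List.foldl pvStepA ([], []) line.toList).1
      ++ (List.foldl pvStepA ([], []) line.toList).2) = _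
  have := aInv line.toList [] [] (Or.inl rfl)
  simp only [List.nil_append] at this
  rw [this, ← pvB_eq_pvF]
  rfl
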